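-- pv_equiv track=rewrite | github.com/huybro/semops-experiments | run_no_vdb.py | find_match
-- ===== SOURCE A (Python) =====
-- def find_match(cap_list, claim, content=None):
--     claim_short = claim[:40]
--     for entry in cap_list:
--         if claim_short in entry.get("claim", ""):
--             if content is None or content[:40] in entry.get("content", ""):
--                 return entry
--     for entry in cap_list:
--         if claim_short in entry.get("input", ""):
--             if content is None or content[:40] in entry.get("input", ""):
--                 return entry
--     return {"input": "", "output": "", "claim": "", "content": ""}
-- ===== SOURCE B (Python) =====
-- def find_match(cap_list, claim, content=None):
--     claim_short = claim[:40]
--     content_short = None if content is None else content[:40]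
--     first_input_match = None
--     for entry in cap_list:
--         if claim_short in entry.get("claim", "") and \
--            (content_short is None or content_short in entry.get("content", "")):
--             return entry
--         if first_input_match is None and claim_short in entry.get("input", "") and \
--            (content_short is None or content_short in entry.get("input", "")):
--             first_input_match = entry
--     if first_input_match is not None:
--         return first_input_match
--     return {"input": "", "output": "", "claim": "", "content": ""}
-- ===== Notes on version B (the rewrite author's own statement) =====
-- stated objective: alternative
-- what changed: Single pass over cap_list that returns a claim-match immediately and remembers the first input-match for the fallback, instead of A's two separate scans of the list.
import Mathlib
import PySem

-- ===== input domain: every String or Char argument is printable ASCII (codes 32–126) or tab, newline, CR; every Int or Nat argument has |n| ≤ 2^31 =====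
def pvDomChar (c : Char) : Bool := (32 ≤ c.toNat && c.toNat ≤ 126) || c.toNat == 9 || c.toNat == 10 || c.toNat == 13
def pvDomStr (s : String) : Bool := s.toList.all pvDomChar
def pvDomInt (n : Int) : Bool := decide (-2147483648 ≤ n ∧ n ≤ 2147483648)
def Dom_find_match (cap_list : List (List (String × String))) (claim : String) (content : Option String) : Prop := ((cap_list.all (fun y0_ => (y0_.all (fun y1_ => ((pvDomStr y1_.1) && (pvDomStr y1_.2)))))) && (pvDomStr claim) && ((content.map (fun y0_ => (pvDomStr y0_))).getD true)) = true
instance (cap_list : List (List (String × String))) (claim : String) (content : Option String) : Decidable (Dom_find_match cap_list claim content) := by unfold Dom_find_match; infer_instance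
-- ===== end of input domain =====

-- B is a single pass returning a claim-match at once and remembering the first input-match,
-- instead of A's two scans; same cost, return value proved identical on all inputs.

-- shared primitive: entry.get(k, "") on a dict given as an association list (first match)
def pvEntryGetD (e : List (String × String)) (k : String) : String :=
  ((e.find? (fun p => p.1 == k)).map Prod.snd).getD ""

-- ===== PORT A =====
-- the test of A's first loop: claim_short in entry.get("claim","") and (content is None or content[:40] in entry.get("content",""))
def pvCondClaim (cs : String) (content : Option String) (e : List (String × String)) : Bool :=
  PySem.Str.isIn cs (pvEntryGetD e "claim") &&
    (match content with
     | none => true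
     | some c => PySem.Str.isIn (PySem.Str.slice c none (some 40)) (pvEntryGetD e "content"))

-- the test of A's second loop
def pvCondInput (cs : String) (content : Option String) (e : List (String × String)) : Bool :=
  PySem.Str.isIn cs (pvEntryGetD e "input") &&
    (match content with
     | none => true
     | some c => PySem.Str.isIn (PySem.Str.slice c none (some 40)) (pvEntryGetD e "input"))

-- A's first loop: return the first entry passing pvCondClaim
def pvLoopClaim (cs : String) (content : Option String) : List (List (String × String)) → Option (List (String × String))
  | [] => none
  | e :: rest => if pvCondClaim cs content e then some e else pvLoopClaim cs content rest

-- A's second loop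
def pvLoopInput (cs : String) (content : Option String) : List (List (String × String)) → Option (List (String × String))
  | [] => none
  | e :: rest => if pvCondInput cs content e then some e else pvLoopInput cs content rest

def pvDefaultEntry : List (String × String) :=
  [("input", ""), ("output", ""), ("claim", ""), ("content", "")]

def find_match (cap_list : List (List (String × String))) (claim : String) (content : Option String) : List (String × String) :=
  let claim_short := PySem.Str.slice claim none (some 40)
  match pvLoopClaim claim_short content cap_list with
  | some e => e
  | none =>
    match pvLoopInput claim_short content cap_list with
    | some e => e
    | none => pvDefaultEntry

-- ===== PORT B =====
-- single pass: return a claim-match immediately, remember the first input-match in `stored`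
def pvAltLoop (cs : String) (content : Option String) :
    List (List (String × String)) → Option (List (String × String)) → List (String × String)
  | [], stored => stored.getD pvDefaultEntry
  | e :: rest, stored =>
    if pvCondClaim cs content e then e
    else pvAltLoop cs content rest
      (if stored.isNone && pvCondInput cs content e then some e else stored)

def find_match_alt (cap_list : List (List (String × String))) (claim : String) (content : Option String) : List (String × String) :=
  pvAltLoop (PySem.Str.slice claim none (some 40)) content cap_list none

-- ===== PRECONDITION & SPEC =====
def Spec_find_match (cap_list : List (List (String × String))) (claim : String) (content : Option String) (out : List (String × String)) : Prop := out = find_match_alt cap_list claim content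
instance (cap_list : List (List (String × String))) (claim : String) (content : Option String) (out : List (String × String)) : Decidable (Spec_find_match cap_list claim content out) := by unfold Spec_find_match; infer_instance

-- ===== CLAIM (what is proved, stated in full; the proofs are below) =====
def Claim_equal_find_match : Prop := ∀ (cap_list : List (List (String × String))) (claim : String) (content : Option String), Dom_find_match cap_list claim content → Spec_find_match cap_list claim content (find_match cap_list claim content)

-- ===== LEMMAS AND PROOFS =====

-- invariant of B's loop: it equals "first claim-match, else stored, else first input-match, else default"
theorem pvAltLoop_spec (cs : String) (content : Option String)
    (l : List (List (String × String))) (stored : Option (List (String × String))) :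
    pvAltLoop cs content l stored =
      match pvLoopClaim cs content l with
      | some e => e
      | none => ((stored.or (pvLoopInput cs content l)).getD pvDefaultEntry) := by
  induction l generalizing stored with
  | nil => cases stored <;> simp [pvAltLoop, pvLoopClaim, pvLoopInput, Option.or]
  | cons e rest ih =>
    by_cases hc : pvCondClaim cs content e
    · simp [pvAltLoop, pvLoopClaim, hc]
    · by_cases hi : pvCondInput cs content e <;>
        cases stored <;>
          simp [pvAltLoop, pvLoopClaim, pvLoopInput, hc, hi, ih, Option.or]

-- ===== VERDICT (by name: the statement is the Claim_ definition above) =====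
theorem find_match_spec : Claim_equal_find_match := by
  intro cap_list claim content _
  unfold Spec_find_match find_match find_match_alt
  rw [pvAltLoop_spec]
  cases h : pvLoopClaim (PySem.Str.slice claim none (some 40)) content cap_list <;>
    cases h2 : pvLoopInput (PySem.Str.slice claim none (some 40)) content cap_list <;>
      simp [h, h2, Option.or]
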